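-- pv_equiv track=rewrite | github.com/crc32a/bexar_court_reader | utils.py | pop_rows
-- ===== SOURCE A (Python) =====
-- def pop_rows(rows, n):
--     l = len(rows)
--     out = []
--     if l < n:
--         n = l
--     for i in range(0, n):
--         out.append(rows.pop())
--     return out
-- ===== SOURCE B (Python) =====
-- def pop_rows(rows, n):
--     m = len(rows)
--     if n > m:
--         n = m
--     out = rows[m - n:][::-1]
--     del rows[m - n:]
--     return out
-- ===== Notes on version B (the rewrite author's own statement) =====
-- stated objective: simpler
-- what changed: Replaces the element-by-element pop loop with a single reversed tail-slice rows[m-n:][::-1] plus one bulk 'del rows[m-n:]', keeping the same in-place mutation of rows.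
import Mathlib
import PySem

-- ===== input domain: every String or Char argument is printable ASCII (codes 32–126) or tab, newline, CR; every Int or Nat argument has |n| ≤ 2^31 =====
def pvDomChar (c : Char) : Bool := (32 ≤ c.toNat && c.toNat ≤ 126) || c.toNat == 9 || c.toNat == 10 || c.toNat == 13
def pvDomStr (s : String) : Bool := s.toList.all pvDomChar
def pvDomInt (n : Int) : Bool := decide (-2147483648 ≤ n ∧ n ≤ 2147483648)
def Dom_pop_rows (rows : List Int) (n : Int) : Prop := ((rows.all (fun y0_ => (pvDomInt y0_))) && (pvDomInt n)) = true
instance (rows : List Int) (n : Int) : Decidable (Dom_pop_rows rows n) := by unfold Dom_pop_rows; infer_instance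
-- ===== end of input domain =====

-- B replaces A's element-by-element pop loop by one reversed tail slice and a bulk
-- truncation (simpler decomposition). Both A and B mutate the passed list in place;
-- the equivalence proved here is about the RETURN value only (the final list state is
-- identical in both, but is not part of the claim).

-- ===== PORT A =====
-- the body of A's for-loop: out.append(rows.pop()), as a named helper
def pvStep (st : List Int × List Int) : List Int × List Int :=
  match PySem.List.pop? st.1 (-1) with
  | some (x, rest) => (rest, st.2 ++ [x])
  | none => st   -- Python would raise IndexError here; unreachable since n' ≤ len(rows)

-- transliteration of A: clamp n to len(rows), then n times pop the last element into out
def pop_rows (rows : List Int) (n : Int) : List Int :=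
  let l : Int := rows.length
  let n' : Int := if l < n then l else n
  ((PySem.List.pyRange 0 n' 1).foldl (fun st _ => pvStep st) (rows, [])).2

-- ===== PORT B =====
-- transliteration of Source B: m = len(rows); clamp n to m; out = rows[m-n:][::-1]
def pop_rows_alt (rows : List Int) (n : Int) : List Int :=
  let m : Int := rows.length
  let n' : Int := if m < n then m else n
  (PySem.List.slice? (PySem.List.slice rows (some (m - n')) none) none none (-1)).getD []

-- ===== PRECONDITION & SPEC =====
def Spec_pop_rows (rows : List Int) (n : Int) (out : List Int) : Prop := out = pop_rows_alt rows n
instance (rows : List Int) (n : Int) (out : List Int) : Decidable (Spec_pop_rows rows n out) := by unfold Spec_pop_rows; infer_instance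

-- ===== CLAIM (what is proved, stated in full; the proofs are below) =====
def Claim_equal_pop_rows : Prop := ∀ (rows : List Int) (n : Int), Dom_pop_rows rows n → Spec_pop_rows rows n (pop_rows rows n)

-- ===== LEMMAS AND PROOFS =====

lemma foldl_const_eq_iterate {α β : Type} (g : α → α) (l : List β) (init : α) :
    l.foldl (fun s _ => g s) init = g^[l.length] init := by
  induction l generalizing init with
  | nil => rfl
  | cons b t ih =>
      simp [List.foldl_cons, ih, Function.iterate_succ_apply]

lemma iterate_pvStep (k : Nat) (rows out : List Int) (h : k ≤ rows.length) :
    pvStep^[k] (rows, out) =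
      (rows.take (rows.length - k), out ++ (rows.drop (rows.length - k)).reverse) := by
  induction k with
  | zero => simp
  | succ k ih =>
      have hk : k ≤ rows.length := Nat.le_of_succ_le h
      rw [Function.iterate_succ_apply', ih hk]
      obtain ⟨m, hm⟩ : ∃ m, rows.length - k = m + 1 := ⟨rows.length - k - 1, by omega⟩
      have hm' : rows.length - (k + 1) = m := by omega
      have hmlt : m < rows.length := by omega
      rw [hm, hm']
      unfold pvStep
      rw [List.take_add_one, List.getElem?_eq_getElem hmlt]
      simp only [Option.toList_some, PySem.List.pop?_last]
      rw [List.drop_eq_getElem_cons hmlt, List.reverse_cons]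
      simp [List.append_assoc]

theorem pop_rows_spec : Claim_equal_pop_rows := by
  intro rows n _
  unfold Spec_pop_rows pop_rows pop_rows_alt
  simp only []
  set L : Int := (rows.length : Int) with hL
  by_cases hn : n ≤ 0
  · -- n' = n ≤ 0: zero loop iterations on the left, empty slice on the right
    have hif : (if L < n then L else n) = n := by
      rw [if_neg]
      omega
    rw [hif]
    have hk : (n - 0).toNat = 0 := by omega
    rw [foldl_const_eq_iterate pvStep, PySem.List.length_pyRange_one, hk]
    have hge : 0 ≤ L - n := by omega
    rw [PySem.List.slice_from _ hge, PySem.List.slice?_none_none_neg_one]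
    have hnil : rows.drop (L - n).toNat = [] := by
      apply List.drop_eq_nil_of_le
      omega
    simp [hnil]
  · -- 0 < n: n' = min L n, the standard case
    have hn : 0 < n := by omega
    set n' : Int := if L < n then L else n with hn'
    have h0 : 0 ≤ n' := by
      rw [hn']
      split <;> omega
    have h1 : n' ≤ L := by
      rw [hn']
      split <;> omega
    have hkle : (n' - 0).toNat ≤ rows.length := by omega
    rw [foldl_const_eq_iterate pvStep, PySem.List.length_pyRange_one,
        iterate_pvStep _ _ _ hkle]
    have hge : 0 ≤ L - n' := by omega
    rw [PySem.List.slice_from _ hge, PySem.List.slice?_none_none_neg_one]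
    simp only [Option.getD_some]
    have heq : rows.length - (n' - 0).toNat = (L - n').toNat := by omega
    rw [heq]
    rw [List.nil_append]
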